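-- pv_equiv track=rewrite | github.com/iffystrayer/AIEngineeringProgram | src/cli/utils.py | create_stage_indicator
-- ===== SOURCE A (Python) =====
-- def create_stage_indicator(current: int, total: int = 5) -> str:
--     """Create a stage progress indicator."""
--     stages = []
--     for i in range(1, total + 1):
--         if i < current:
--             stages.append(f"[green]✓[/green]")
--         elif i == current:
--             stages.append(f"[bold cyan]●[/bold cyan]")
--         else:
--             stages.append(f"[dim]○[/dim]")
--     return " ".join(stages)
-- ===== SOURCE B (Python) =====
-- def create_stage_indicator(current: int, total: int = 5) -> str:
--     """Create a stage progress indicator (count-based construction)."""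
--     green = max(0, min(current - 1, total))
--     cyan = 1 <= current <= total
--     dim = total - green - (1 if cyan else 0)
--     parts = (["[green]\u2713[/green]"] * green
--              + (["[bold cyan]\u25cf[/bold cyan]"] if cyan else [])
--              + ["[dim]\u25cb[/dim]"] * dim)
--     return " ".join(parts)
-- ===== Notes on version B (the rewrite author's own statement) =====
-- stated objective: simpler
-- what changed: Replaces the per-stage if/elif/else loop over range(1,total+1) with a closed-form computation of the three segment counts (green, cyan, dim) and builds the result by list repetition and one join.
import Mathlib
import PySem

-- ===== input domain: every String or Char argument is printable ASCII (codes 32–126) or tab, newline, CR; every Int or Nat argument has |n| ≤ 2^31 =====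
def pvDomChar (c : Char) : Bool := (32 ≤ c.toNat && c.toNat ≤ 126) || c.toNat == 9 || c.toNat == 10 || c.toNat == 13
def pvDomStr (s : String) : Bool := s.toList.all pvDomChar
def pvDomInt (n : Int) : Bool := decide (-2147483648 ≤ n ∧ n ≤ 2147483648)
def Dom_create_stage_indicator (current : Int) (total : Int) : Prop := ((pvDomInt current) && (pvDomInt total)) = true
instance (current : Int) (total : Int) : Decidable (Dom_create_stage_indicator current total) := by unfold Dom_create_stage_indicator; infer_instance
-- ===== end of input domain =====

-- B replaces A's per-stage if/elif/else loop with closed-form segment counts; objective: simpler.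

-- ===== PORT A =====
def create_stage_indicator (current : Int) (total : Int) : String :=
  -- stages = []; for i in range(1, total+1): append the branch's glyph
  let stages : List String :=
    (PySem.List.pyRange 1 (total + 1) 1).foldl
      (fun acc i =>
        acc ++ [if i < current then "[green]✓[/green]"
                else if i = current then "[bold cyan]●[/bold cyan]"
                else "[dim]○[/dim]"]) []
  PySem.Str.join " " stages

-- ===== PORT B =====
def create_stage_indicator_alt (current : Int) (total : Int) : String :=
  let green : Int := max 0 (min (current - 1) total)
  let cyan : Bool := decide (1 ≤ current ∧ current ≤ total)
  let dim : Int := total - green - (if cyan then 1 else 0)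
  let parts : List String :=
    List.replicate green.toNat "[green]✓[/green]"
      ++ (if cyan then ["[bold cyan]●[/bold cyan]"] else [])
      ++ List.replicate dim.toNat "[dim]○[/dim]"
  PySem.Str.join " " parts

-- ===== PRECONDITION & SPEC =====
def Spec_create_stage_indicator (current : Int) (total : Int) (out : String) : Prop := out = create_stage_indicator_alt current total
instance (current : Int) (total : Int) (out : String) : Decidable (Spec_create_stage_indicator current total out) := by unfold Spec_create_stage_indicator; infer_instance

-- ===== CLAIM (what is proved, stated in full; the proofs are below) =====
def Claim_equal_create_stage_indicator : Prop := ∀ (current : Int) (total : Int), Dom_create_stage_indicator current total → Spec_create_stage_indicator current total (create_stage_indicator current total)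

-- ===== LEMMAS AND PROOFS =====

-- A's per-stage glyph
def pvGlyph (c i : Int) : String :=
  if i < c then "[green]✓[/green]"
  else if i = c then "[bold cyan]●[/bold cyan]"
  else "[dim]○[/dim]"

-- B's parts list, as a function of the inputs
def pvParts (c t : Int) : List String :=
  List.replicate (max 0 (min (c - 1) t)).toNat "[green]✓[/green]"
    ++ (if 1 ≤ c ∧ c ≤ t then ["[bold cyan]●[/bold cyan]"] else [])
    ++ List.replicate (t - max 0 (min (c - 1) t) - (if 1 ≤ c ∧ c ≤ t then 1 else 0)).toNat "[dim]○[/dim]"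

lemma pvParts_step (c : Int) (n : Nat) :
    pvParts c ((n : Int) + 1) = pvParts c (n : Int) ++ [pvGlyph c ((n : Int) + 1)] := by
  unfold pvParts pvGlyph
  rcases lt_trichotomy ((n : Int) + 1) c with h | h | h
  · have h1 : max 0 (min (c - 1) ((n : Int) + 1)) = (n : Int) + 1 := by omega
    have h2 : max 0 (min (c - 1) (n : Int)) = (n : Int) := by omega
    have h3 : ¬ (1 ≤ c ∧ c ≤ (n : Int) + 1) := by omega
    have h4 : ¬ (1 ≤ c ∧ c ≤ (n : Int)) := by omega
    simp only [h1, h2, if_neg h3, if_neg h4, if_pos h]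
    have : ((n : Int) + 1).toNat = n + 1 := by omega
    simp [this, List.replicate_succ' (n := n)]
  · have h1 : max 0 (min (c - 1) ((n : Int) + 1)) = (n : Int) := by omega
    have h2 : max 0 (min (c - 1) (n : Int)) = (n : Int) := by omega
    have h3 : (1 ≤ c ∧ c ≤ (n : Int) + 1) := by omega
    have h4 : ¬ (1 ≤ c ∧ c ≤ (n : Int)) := by omega
    have h5 : ¬ ((n : Int) + 1 < c) := by omega
    simp only [h1, h2, if_pos h3, if_neg h4, if_neg h5]
    simp
    omega
  · have h1 : max 0 (min (c - 1) ((n : Int) + 1)) = max 0 (min (c - 1) (n : Int)) := by omega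
    have h2 : (1 ≤ c ∧ c ≤ (n : Int) + 1) ↔ (1 ≤ c ∧ c ≤ (n : Int)) := by omega
    have h5 : ¬ ((n : Int) + 1 < c) := by omega
    have h6 : ¬ ((n : Int) + 1 = c) := by omega
    simp only [h1, h2, if_neg h5, if_neg h6]
    by_cases hc : 1 ≤ c ∧ c ≤ (n : Int)
    · simp [hc]
      rw [show ((n : Int) + 1 - min (c - 1) (n : Int)).toNat - 1
            = (((n : Int) - min (c - 1) (n : Int)).toNat - 1) + 1 from by omega,
          List.replicate_succ']
    · simp [hc]
      rw [show ((n : Int) + 1 - max 0 (min (c - 1) (n : Int))).toNat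
            = ((n : Int) - max 0 (min (c - 1) (n : Int))).toNat + 1 from by omega,
          List.replicate_succ']

lemma pvMap_eq_parts (c : Int) (n : Nat) :
    (PySem.List.pyRange 1 ((n : Int) + 1) 1).map (pvGlyph c) = pvParts c (n : Int) := by
  induction n with
  | zero =>
    push_cast
    rw [PySem.List.pyRange_one_eq_nil (by omega)]
    unfold pvParts
    have h2 : ¬ (1 ≤ c ∧ c ≤ (0 : Int)) := by omega
    simp [h2]
  | succ k ih =>
    have hr : PySem.List.pyRange 1 ((k : Int) + 1 + 1) 1
        = PySem.List.pyRange 1 ((k : Int) + 1) 1 ++ [(k : Int) + 1] := by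
      have := PySem.List.pyRange_one_succ_right (a := 1) (b := (k : Int) + 1) (by omega)
      simpa using this
    have : ((k + 1 : Nat) : Int) = (k : Int) + 1 := by push_cast; ring
    rw [this, hr, List.map_append, ih, List.map_singleton, ← pvParts_step]

lemma pvNeg_case (c t : Int) (ht : t < 0) :
    (PySem.List.pyRange 1 (t + 1) 1).map (pvGlyph c) = pvParts c t := by
  rw [PySem.List.pyRange_one_eq_nil (by omega)]
  unfold pvParts
  have h2 : ¬ (1 ≤ c ∧ c ≤ t) := by omega
  have h1 : (max 0 (min (c - 1) t)).toNat = 0 := by omega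
  have h3 : (t - max 0 (min (c - 1) t) - 0).toNat = 0 := by omega
  simp [h1, h2]
  omega

-- ===== VERDICT (by name: the statement is the Claim_ definition above) =====
theorem create_stage_indicator_spec : Claim_equal_create_stage_indicator := by
  intro c t _
  show create_stage_indicator c t = create_stage_indicator_alt c t
  unfold create_stage_indicator create_stage_indicator_alt
  rw [PySem.List.foldl_append_singleton_eq_map]
  have hmap : (PySem.List.pyRange 1 (t + 1) 1).map (fun i =>
        if i < c then "[green]✓[/green]"
        else if i = c then "[bold cyan]●[/bold cyan]"
        else "[dim]○[/dim]") = pvParts c t := by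
    by_cases h : 0 ≤ t
    · have : t = ((t.toNat : Nat) : Int) := by omega
      rw [this]
      exact pvMap_eq_parts c t.toNat
    · exact pvNeg_case c t (by omega)
  rw [List.nil_append, hmap]
  unfold pvParts
  by_cases hc : 1 ≤ c ∧ c ≤ t <;> simp [hc]
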